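-- pv_equiv track=rewrite | github.com/AaronJ6/DSA-Practice | count_no_of_ways_toHouses.py | countHousePlacements
-- ===== SOURCE A (Python) =====
-- def countHousePlacements(n):
--     #* Similar to a fibonacci series,
--     #* where the n values is updated using sum of prev 2 vals
--     if(n==1):return 4
--     if(n==2):return 9
--
--     MOD=pow(10,9)+7
--
--     prev_prev=2
--     prev=3
--     for i in range(3,n+1):
--         current=prev+prev_prev
--         prev_prev=prev
--         prev=current
--
--     return (prev*prev)%MOD
-- ===== SOURCE B (Python) =====
-- def countHousePlacements(n):
--     # Fast-doubling Fibonacci with modular arithmetic: O(log n) instead of A's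
--     # O(n) loop on ever-growing big integers. The answer is F(n+2)^2 mod 1e9+7.
--     MOD = 10**9 + 7
--
--     def fib_pair(k):
--         # returns (F(k) % MOD, F(k+1) % MOD)
--         if k == 0:
--             return (0, 1)
--         a, b = fib_pair(k // 2)
--         c = (a * ((2 * b - a) % MOD)) % MOD
--         d = (a * a + b * b) % MOD
--         if k % 2:
--             return (d, (c + d) % MOD)
--         return (c, d)
--
--     f = fib_pair(n + 2)[0]
--     return (f * f) % MOD
-- ===== Notes on version B (the rewrite author's own statement) =====
-- stated objective: faster
-- what changed: Replaced A's linear loop over arbitrarily large Fibonacci integers with fast-doubling Fibonacci computed modulo 10^9+7 and squared mod at the end.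
-- outside the precondition, e.g. on countHousePlacements(0): A returns 9, B returns 1
import Mathlib
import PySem

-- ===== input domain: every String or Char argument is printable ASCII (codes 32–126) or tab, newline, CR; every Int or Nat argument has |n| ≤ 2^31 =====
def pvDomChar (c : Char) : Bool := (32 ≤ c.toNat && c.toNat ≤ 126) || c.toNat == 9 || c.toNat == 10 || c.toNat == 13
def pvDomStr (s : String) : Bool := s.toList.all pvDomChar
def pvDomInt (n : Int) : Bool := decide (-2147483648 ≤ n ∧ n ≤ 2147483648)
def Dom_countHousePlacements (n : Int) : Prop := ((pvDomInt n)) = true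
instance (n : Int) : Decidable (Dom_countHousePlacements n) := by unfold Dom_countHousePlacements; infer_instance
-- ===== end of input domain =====

-- B replaces A's O(n) loop on ever-growing Fibonacci big integers by fast-doubling
-- Fibonacci computed modulo 10^9+7 (O(log n) modular multiplications); same result.

-- ===== PORT A =====
def countHousePlacements (n : Int) : Int :=
  if n = 1 then 4
  else if n = 2 then 9
  else
    let MOD : Int := 10 ^ 9 + 7
    -- for i in range(3, n+1): current = prev + prev_prev; prev_prev = prev; prev = current
    let st := (PySem.List.pyRange 3 (n + 1) 1).foldl
      (fun (st : Int × Int) _ => (st.2, st.2 + st.1)) ((2 : Int), (3 : Int))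
    PySem.Int.mod (st.2 * st.2) MOD

-- ===== PORT B =====
def pvMOD : Int := 10 ^ 9 + 7

-- fast-doubling helper of Source B: fibPair k = (F(k) % MOD, F(k+1) % MOD).
-- Source B's recursion is on a Python int; on Pre_ (n ≥ 1) the argument n+2 is
-- positive, so recursion on Nat via `.toNat` at the call site is exact there.
def fibPair : Nat → Int × Int
  | 0 => (0, 1)
  | (k + 1) =>
    let p := fibPair ((k + 1) / 2)
    let c := PySem.Int.mod (p.1 * PySem.Int.mod (2 * p.2 - p.1) pvMOD) pvMOD
    let d := PySem.Int.mod (p.1 * p.1 + p.2 * p.2) pvMOD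
    if (k + 1) % 2 = 1 then (d, PySem.Int.mod (c + d) pvMOD) else (c, d)
decreasing_by exact Nat.div_lt_self (Nat.succ_pos k) (by norm_num)

def countHousePlacements_alt (n : Int) : Int :=
  let f := (fibPair (n + 2).toNat).1
  PySem.Int.mod (f * f) pvMOD

-- ===== PRECONDITION & SPEC =====
-- Pre_ restricts to the task's natural domain, positive house counts n ≥ 1; for
-- n ≤ 0 A's loop does not run and it falls through to return 9 from the initial
-- loop state, which is outside the function's purpose.
def Pre_countHousePlacements (n : Int) : Prop := 1 ≤ n
instance (n : Int) : Decidable (Pre_countHousePlacements n) := by unfold Pre_countHousePlacements; infer_instance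
def pvWitness_countHousePlacements : Int := 5

def Spec_countHousePlacements (n : Int) (out : Int) : Prop := out = countHousePlacements_alt n
instance (n : Int) (out : Int) : Decidable (Spec_countHousePlacements n out) := by unfold Spec_countHousePlacements; infer_instance

-- ===== CLAIM (what is proved, stated in full; the proofs are below) =====
def Claim_equal_countHousePlacements : Prop := ∀ (n : Int), Dom_countHousePlacements n → Pre_countHousePlacements n → Spec_countHousePlacements n (countHousePlacements n)

-- ===== LEMMAS AND PROOFS =====

lemma pvMOD_pos : (0 : Int) < pvMOD := by norm_num [pvMOD]

-- A's loop computes consecutive Fibonacci numbers (exact integers, no mod).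
lemma pv_loop_eq (j : Nat) :
    (PySem.List.pyRange 3 (3 + (j : Int)) 1).foldl
      (fun (st : Int × Int) _ => (st.2, st.2 + st.1)) ((2 : Int), (3 : Int))
    = ((Nat.fib (j + 3) : Int), (Nat.fib (j + 4) : Int)) := by
  induction j with
  | zero =>
    rw [show (3:Int) + ((0:Nat):Int) = 3 by norm_num, PySem.List.pyRange_one_eq_nil le_rfl]
    simp
    constructor <;> decide
  | succ k ih =>
    have h1 : (3 : Int) + ((k : Int) + 1) = (3 + (k : Int)) + 1 := by ring
    have h2 : (3 : Int) ≤ 3 + (k : Int) := by omega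
    push_cast
    rw [h1, PySem.List.pyRange_one_succ_right h2, List.foldl_append, ih]
    simp [Nat.fib_add_two]
    ring

-- casts of the fast-doubling identities to ℤ
lemma pv_fib_two_mul (m : Nat) :
    ((Nat.fib (2 * m) : Int)) = (Nat.fib m : Int) * (2 * (Nat.fib (m + 1) : Int) - Nat.fib m) := by
  have hle : Nat.fib m ≤ 2 * Nat.fib (m + 1) := by
    have := Nat.fib_le_fib_succ (n := m); omega
  rw [Nat.fib_two_mul]
  push_cast [hle]
  ring

lemma pv_fib_two_mul_add_one (m : Nat) :
    ((Nat.fib (2 * m + 1) : Int)) = (Nat.fib m : Int) * Nat.fib m + (Nat.fib (m + 1) : Int) * Nat.fib (m + 1) := by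
  rw [Nat.fib_two_mul_add_one]
  push_cast
  ring

lemma fibPair_eq (k : Nat) :
    fibPair k = ((Nat.fib k : Int) % pvMOD, (Nat.fib (k + 1) : Int) % pvMOD) := by
  induction k using Nat.strong_induction_on with
  | _ k ih =>
    match k with
    | 0 =>
      rw [fibPair]
      norm_num [Nat.fib_one, pvMOD]
    | (k + 1) =>
      have hm : (k + 1) / 2 < k + 1 := Nat.div_lt_self (Nat.succ_pos k) (by norm_num)
      set m := (k + 1) / 2 with hmdef
      have hIH := ih m hm
      have hp := pvMOD_pos
      have hred : ∀ x : Int, (x % pvMOD) ≡ x [ZMOD pvMOD] := fun x => Int.emod_emod_of_dvd _ dvd_rfl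
      -- congruences of the three intermediate values
      have ha : ((Nat.fib m : Int) % pvMOD) ≡ (Nat.fib m : Int) [ZMOD pvMOD] :=
        hred _
      have hb : ((Nat.fib (m+1) : Int) % pvMOD) ≡ (Nat.fib (m+1) : Int) [ZMOD pvMOD] :=
        hred _
      have hc : ((Nat.fib m : Int) % pvMOD) * ((2 * ((Nat.fib (m+1) : Int) % pvMOD) - (Nat.fib m : Int) % pvMOD) % pvMOD)
          ≡ (Nat.fib (2 * m) : Int) [ZMOD pvMOD] := by
        have h1 : (2 * ((Nat.fib (m+1) : Int) % pvMOD) - (Nat.fib m : Int) % pvMOD)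
            ≡ 2 * (Nat.fib (m+1) : Int) - (Nat.fib m : Int) [ZMOD pvMOD] :=
          ((Int.ModEq.refl 2).mul hb).sub ha
        have h2 := ha.mul ((hred _).trans h1)
        rw [pv_fib_two_mul]
        exact h2
      have hd : ((Nat.fib m : Int) % pvMOD) * ((Nat.fib m : Int) % pvMOD)
            + ((Nat.fib (m+1) : Int) % pvMOD) * ((Nat.fib (m+1) : Int) % pvMOD)
          ≡ (Nat.fib (2 * m + 1) : Int) [ZMOD pvMOD] := by
        rw [pv_fib_two_mul_add_one]
        exact (ha.mul ha).add (hb.mul hb)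
      have hparity := Nat.div_add_mod (k + 1) 2
      rcases Nat.mod_two_eq_zero_or_one (k + 1) with hpar | hpar
      · -- k + 1 = 2 * m
        have hk : k + 1 = 2 * m := by omega
        rw [fibPair, ← hmdef, hIH]
        rw [if_neg (by omega)]
        simp only [PySem.Int.mod_eq_emod_of_pos hp]
        rw [hk]
        exact Prod.ext hc hd
      · -- k + 1 = 2 * m + 1
        have hk : k + 1 = 2 * m + 1 := by omega
        rw [fibPair, ← hmdef, hIH]
        rw [if_pos (by omega)]
        simp only [PySem.Int.mod_eq_emod_of_pos hp]
        rw [hk]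
        refine Prod.ext hd ?_
        have : (Nat.fib (2 * m + 1 + 1) : Int) = (Nat.fib (2 * m) : Int) + (Nat.fib (2 * m + 1) : Int) := by
          rw [Nat.fib_add_two]; push_cast; ring
        rw [this]
        exact ((hred _).trans hc).add ((hred _).trans hd)

-- ===== VERDICT (by name: the statement is the Claim_ definition above) =====
theorem countHousePlacements_spec : Claim_equal_countHousePlacements := by
  intro n _ hpre
  unfold Spec_countHousePlacements
  unfold Pre_countHousePlacements at hpre
  rcases eq_or_ne n 1 with rfl | h1
  · have hB : countHousePlacements_alt 1 = 4 := by
      rw [countHousePlacements_alt, show ((1:Int) + 2).toNat = 3 by decide, fibPair_eq,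
        PySem.Int.mod_eq_emod_of_pos pvMOD_pos]
      norm_num [pvMOD, show Nat.fib 3 = 2 by decide]
    rw [hB]; rw [countHousePlacements]; norm_num
  rcases eq_or_ne n 2 with rfl | h2
  · have hB : countHousePlacements_alt 2 = 9 := by
      rw [countHousePlacements_alt, show ((2:Int) + 2).toNat = 4 by decide, fibPair_eq,
        PySem.Int.mod_eq_emod_of_pos pvMOD_pos]
      norm_num [pvMOD, show Nat.fib 4 = 3 by decide]
    rw [hB]; rw [countHousePlacements]; norm_num
  -- n ≥ 3
  have hn3 : 3 ≤ n := by omega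
  obtain ⟨k, hk⟩ : ∃ k : Nat, n = 3 + (k : Int) := ⟨(n - 3).toNat, by omega⟩
  subst hk
  have hp := pvMOD_pos
  have hA : countHousePlacements (3 + (k : Int))
      = PySem.Int.mod ((Nat.fib (k + 5) : Int) * (Nat.fib (k + 5) : Int)) pvMOD := by
    rw [countHousePlacements, if_neg (by omega), if_neg (by omega)]
    have h1 : (3 : Int) + (k : Int) + 1 = 3 + ((k + 1 : Nat) : Int) := by push_cast; ring
    rw [h1, pv_loop_eq (k + 1)]
    norm_num [pvMOD]
  have hB : countHousePlacements_alt (3 + (k : Int))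
      = PySem.Int.mod (((Nat.fib (k + 5) : Int) % pvMOD) * ((Nat.fib (k + 5) : Int) % pvMOD)) pvMOD := by
    rw [countHousePlacements_alt]
    have h1 : ((3 : Int) + (k : Int) + 2).toNat = k + 5 := by omega
    rw [h1, fibPair_eq]
  rw [hA, hB, PySem.Int.mod_eq_emod_of_pos hp, PySem.Int.mod_eq_emod_of_pos hp]
  exact Int.mul_emod _ _ _
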